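-- pv_equiv track=rewrite | github.com/FLaTNNBio/combinatorics_machine_learning_for_gene_fusion | src/testing.py | most_consecutive_frequent
-- ===== SOURCE A (Python) =====
-- import operator
--
-- def most_consecutive_frequent(lst):
--     # Create genes dictionary and initialize each to 0
--     g_dictionary = {}
--     for g in lst:
--         value = 0
--         key = g
--
--         g_dictionary[key] = value
--
--     # Count consecutive frequency for each gene
--     for i in range(1, len(lst)):
--         if lst[i] == lst[i - 1]:
--             value = g_dictionary[lst[i]]
--             value += 1
--             g_dictionary[lst[i]] = value
--
--     return max(g_dictionary.items(), key=operator.itemgetter(1))[0]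
-- ===== SOURCE B (Python) =====
-- import operator
--
-- def most_consecutive_frequent(lst):
--     # One run-length pass: walk the list run by run; each run of length L
--     # contributes L-1 consecutive repeats to its gene.  The first run of a
--     # gene fixes its insertion order (= first appearance), so ties in the
--     # final max resolve exactly as in the two-pass version.
--     counts = {}
--     i = 0
--     n = len(lst)
--     while i < n:
--         g = lst[i]
--         j = i + 1
--         while j < n and lst[j] == g:
--             j += 1
--         counts[g] = counts.get(g, 0) + (j - i - 1)
--         i = j
--     return max(counts.items(), key=operator.itemgetter(1))[0]
-- ===== Notes on version B (the rewrite author's own statement) =====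
-- stated objective: simpler
-- what changed: Replaced A's two passes (initialize every key to 0, then an index-based adjacency comparison over range(1,len)) by a single run-length scan that adds len(run)-1 to each gene's count as the run is traversed; Pre_ excludes only the empty list, on which both raise ValueError.
import Mathlib
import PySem

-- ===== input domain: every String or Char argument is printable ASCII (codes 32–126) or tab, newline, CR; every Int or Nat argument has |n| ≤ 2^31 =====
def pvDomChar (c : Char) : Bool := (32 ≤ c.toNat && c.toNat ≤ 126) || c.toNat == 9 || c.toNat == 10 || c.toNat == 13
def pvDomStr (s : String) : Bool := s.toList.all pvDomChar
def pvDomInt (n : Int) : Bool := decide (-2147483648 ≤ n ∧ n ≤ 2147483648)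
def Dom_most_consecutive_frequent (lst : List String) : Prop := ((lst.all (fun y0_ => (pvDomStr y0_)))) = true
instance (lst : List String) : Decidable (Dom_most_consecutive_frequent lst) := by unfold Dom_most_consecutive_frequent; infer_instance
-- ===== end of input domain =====

-- B replaces A's two passes (key-initialisation, then index-based adjacency count)
-- by a single run-length scan; same counts, same first-appearance tie-breaking.

-- ===== PORT A =====
def most_consecutive_frequent (lst : List String) : String :=
  -- first loop: create genes dictionary and initialize each to 0
  let d0 : PySem.Dict String Int := lst.foldl (fun d g => d.insert g 0) ⟨[]⟩
  -- second loop: for i in range(1, len(lst)); lst[i] is always in range and the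
  -- key lst[i] is always present after the first loop, so g_dictionary[lst[i]]
  -- is ported as getD _ 0 (exact here)
  let d := (PySem.List.pyRange 1 (lst.length : Int) 1).foldl
    (fun d i =>
      if PySem.List.pyGetD lst i "" = PySem.List.pyGetD lst (i - 1) "" then
        let value := d.getD (PySem.List.pyGetD lst i "") 0
        d.insert (PySem.List.pyGetD lst i "") (value + 1)
      else d) d0
  -- max(d.items(), key=itemgetter(1))[0]; max raises on [] (excluded by Pre_)
  ((PySem.List.max? d.items (fun p => p.2)).map Prod.fst).getD ""

-- ===== PORT B =====
-- outer while of Source B: one step per run; the inner while scanning the run is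
-- the takeWhile/dropWhile split of the remaining suffix
def pvRunLoop (d : PySem.Dict String Int) : List String → PySem.Dict String Int
  | [] => d
  | g :: rest =>
      pvRunLoop (d.insert g (d.getD g 0 + ((rest.takeWhile (fun x => x == g)).length : Int)))
        (rest.dropWhile (fun x => x == g))
termination_by l => l.length
decreasing_by
  simpa using Nat.lt_succ_of_le (List.length_dropWhile_le _ _)

def most_consecutive_frequent_alt (lst : List String) : String :=
  ((PySem.List.max? (pvRunLoop ⟨[]⟩ lst).items (fun p => p.2)).map Prod.fst).getD ""

-- ===== PRECONDITION & SPEC =====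
-- Pre_ excludes only the empty list, on which the Python A (and B) raise ValueError in max().
def Pre_most_consecutive_frequent (lst : List String) : Prop := lst ≠ []
instance (lst : List String) : Decidable (Pre_most_consecutive_frequent lst) := by
  unfold Pre_most_consecutive_frequent; infer_instance
def pvWitness_most_consecutive_frequent : List String := ["g1", "g1", "g2"]

def Spec_most_consecutive_frequent (lst : List String) (out : String) : Prop := out = most_consecutive_frequent_alt lst
instance (lst : List String) (out : String) : Decidable (Spec_most_consecutive_frequent lst out) := by unfold Spec_most_consecutive_frequent; infer_instance

-- ===== CLAIM (what is proved, stated in full; the proofs are below) =====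
def Claim_equal_most_consecutive_frequent : Prop := ∀ (lst : List String), Dom_most_consecutive_frequent lst → Pre_most_consecutive_frequent lst → Spec_most_consecutive_frequent lst (most_consecutive_frequent lst)

-- ===== LEMMAS AND PROOFS =====

-- number of adjacent equal pairs with value g, over the pair list lst.zip lst.tail
def pvCnt : List (String × String) → String → Int
  | [], _ => 0
  | p :: ps, g => (if p.2 = p.1 ∧ p.1 = g then 1 else 0) + pvCnt ps g

-- first occurrences of lst that are not in ks, in order
def pvFo : List String → List String → List String
  | [], _ => []
  | g :: rest, ks => if g ∈ ks then pvFo rest ks else g :: pvFo rest (g :: ks)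

theorem pvFo_congr (lst : List String) (ks ks' : List String)
    (h : ∀ x, x ∈ ks ↔ x ∈ ks') : pvFo lst ks = pvFo lst ks' := by
  induction lst generalizing ks ks' with
  | nil => rfl
  | cons g rest ih =>
    simp only [pvFo]
    by_cases hg : g ∈ ks
    · rw [if_pos hg, if_pos ((h g).mp hg)]
      exact ih ks ks' h
    · rw [if_neg hg, if_neg (fun hc => hg ((h g).mpr hc))]
      exact congrArg (g :: ·) (ih (g :: ks) (g :: ks')
        (fun x => by simp [List.mem_cons, h x]))

theorem pvFo_append_of_mem (run rest ks : List String)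
    (h : ∀ x ∈ run, x ∈ ks) : pvFo (run ++ rest) ks = pvFo rest ks := by
  induction run with
  | nil => rfl
  | cons a run ih =>
    simp only [List.cons_append, pvFo, if_pos (h a (List.mem_cons_self ..))]
    exact ih (fun x hx => h x (List.mem_cons_of_mem _ hx))

theorem pvMem_fo_of (lst : List String) (ks : List String) (x : String)
    (hx : x ∈ lst) (hk : x ∉ ks) : x ∈ pvFo lst ks := by
  induction lst generalizing ks with
  | nil => simp at hx
  | cons g rest ih =>
    simp only [pvFo]
    by_cases hg : g ∈ ks
    · rw [if_pos hg]
      rcases List.mem_cons.mp hx with h1 | h1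
      · exact absurd (h1 ▸ hg) hk
      · exact ih ks h1 hk
    · rw [if_neg hg]
      by_cases hxg : x = g
      · exact hxg ▸ List.mem_cons_self ..
      · rcases List.mem_cons.mp hx with h1 | h1
        · exact absurd h1 hxg
        · exact List.mem_cons_of_mem _ (ih (g :: ks) h1
            (fun hc => (List.mem_cons.mp hc).elim hxg hk))

theorem pvGetD_mapshape (ks : List String) (f : String → Int) (g : String) :
    PySem.Dict.getD ⟨ks.map (fun k => (k, f k))⟩ g 0 = if g ∈ ks then f g else 0 := by
  induction ks with
  | nil => simp [PySem.Dict.getD, PySem.Dict.get?]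
  | cons k ks ih =>
    simp only [PySem.Dict.getD, PySem.Dict.get?, List.map_cons, List.find?] at ih ⊢
    by_cases hk : k = g
    · subst hk; simp
    · have hb : (k == g) = false := beq_eq_false_iff_ne.mpr hk
      have hm : (g ∈ k :: ks) = (g ∈ ks) := by
        simp only [List.mem_cons, eq_comm (a := g) (b := k), hk, false_or]
      simp only [hb, hm]
      exact ih

theorem pvInsert_mem (ks : List String) (f : String → Int) (g : String) (v : Int)
    (hmem : g ∈ ks) :
    PySem.Dict.insert ⟨ks.map (fun k => (k, f k))⟩ g v
      = ⟨ks.map (fun k => (k, if k = g then v else f k))⟩ := by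
  have hc : PySem.Dict.contains (⟨ks.map (fun k => (k, f k))⟩ : PySem.Dict String Int) g = true := by
    simp only [PySem.Dict.contains, List.any_eq_true]
    exact ⟨(g, f g), List.mem_map.mpr ⟨g, hmem, rfl⟩, by simp⟩
  simp only [PySem.Dict.insert, hc, if_true]
  congr 1
  rw [List.map_map]
  refine List.map_congr_left (fun k _ => ?_)
  by_cases hk : k = g
  · subst hk; simp
  · simp [hk]

theorem pvInsert_not_mem (ks : List String) (f : String → Int) (g : String) (v : Int)
    (hmem : g ∉ ks) :
    PySem.Dict.insert ⟨ks.map (fun k => (k, f k))⟩ g v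
      = ⟨(ks ++ [g]).map (fun k => (k, if k = g then v else f k))⟩ := by
  have hc : PySem.Dict.contains (⟨ks.map (fun k => (k, f k))⟩ : PySem.Dict String Int) g = false := by
    simp only [PySem.Dict.contains, List.any_eq_false]
    intro p hp
    obtain ⟨k', hk', hke⟩ := List.mem_map.mp hp
    subst hke
    simp only [beq_iff_eq]
    exact fun h : k' = g => hmem (h ▸ hk')
  simp only [PySem.Dict.insert, hc, Bool.false_eq_true, if_false]
  congr 1
  rw [List.map_append]
  congr 1
  · refine List.map_congr_left (fun k hk => ?_)
    have : k ≠ g := fun h => hmem (h ▸ hk)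
    simp [this]
  · simp

-- phase 1 of A
theorem pvPhase1 (lst : List String) (ks : List String) :
    (lst.foldl (fun d g => d.insert g 0) (⟨ks.map (fun k => (k, (0 : Int)))⟩ : PySem.Dict String Int))
      = ⟨(ks ++ pvFo lst ks).map (fun k => (k, (0 : Int)))⟩ := by
  induction lst generalizing ks with
  | nil => simp [pvFo]
  | cons g rest ih =>
    simp only [List.foldl_cons, pvFo]
    by_cases hg : g ∈ ks
    · rw [pvInsert_mem ks _ g 0 hg, if_pos hg]
      have : (fun k => (k, if k = g then (0:Int) else 0)) = (fun k => (k, (0:Int))) := by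
        funext k; simp
      rw [this, ih ks]
    · rw [pvInsert_not_mem ks _ g 0 hg, if_neg hg]
      have : ((ks ++ [g]).map (fun k => (k, if k = g then (0:Int) else 0)))
           = ((ks ++ [g]).map (fun k => (k, (0:Int)))) := by
        refine List.map_congr_left (fun k _ => ?_); simp
      rw [this, ih (ks ++ [g]),
        pvFo_congr rest (ks ++ [g]) (g :: ks) (fun x => by simp [or_comm]),
        List.append_assoc]
      rfl

-- run decomposition of pvCnt on zip pair lists
theorem pvCnt_run (g : String) (rest : List String) (g' : String) :
    pvCnt ((g :: rest).zip rest) g'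
      = (if g' = g then ((rest.takeWhile (fun x => x == g)).length : Int) else 0)
        + pvCnt ((rest.dropWhile (fun x => x == g)).zip (rest.dropWhile (fun x => x == g)).tail) g' := by
  induction rest with
  | nil => simp [pvCnt]
  | cons b t ih =>
    by_cases hb : b = g
    · subst hb
      simp only [List.zip_cons_cons, pvCnt, List.takeWhile_cons, List.dropWhile_cons,
        BEq.rfl, if_true] at ih ⊢
      rw [ih]
      by_cases hg : g' = b
      · subst hg; simp; ring
      · simp only [hg, if_false]
        have : ¬b = g' := fun h => hg h.symm
        simp [this]
    · have hbb : (b == g) = false := beq_eq_false_iff_ne.mpr hb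
      simp only [List.zip_cons_cons, pvCnt, List.takeWhile_cons, List.dropWhile_cons, hbb]
      simp [hb]

-- A's second loop over range(1, n) is the fold over adjacent pairs
theorem pvBridge (lst : List String) (n : Nat) (hn : n ≤ lst.length)
    (d : PySem.Dict String Int) :
    (PySem.List.pyRange 1 (n : Int) 1).foldl
      (fun d i =>
        if PySem.List.pyGetD lst i "" = PySem.List.pyGetD lst (i - 1) "" then
          let value := d.getD (PySem.List.pyGetD lst i "") 0
          d.insert (PySem.List.pyGetD lst i "") (value + 1)
        else d) d
    = ((lst.zip lst.tail).take (n - 1)).foldl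
      (fun d p =>
        if p.2 = p.1 then d.insert p.2 (d.getD p.2 0 + 1) else d) d := by
  induction n with
  | zero =>
    rw [show ((0:Nat):Int) = 0 by norm_num, show PySem.List.pyRange 1 0 1 = [] from by decide]
    simp
  | succ n ih =>
    rcases Nat.eq_zero_or_pos n with h0 | h1
    · subst h0
      rw [show ((0+1:Nat):Int) = 1 by norm_num, show PySem.List.pyRange 1 1 1 = [] from by decide]
      simp
    · have hrange : PySem.List.pyRange 1 ((n+1 : Nat) : Int) 1
          = PySem.List.pyRange 1 ((n : Nat) : Int) 1 ++ [((n : Nat) : Int)] := by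
        have h := PySem.List.pyRange_one_succ_right (a := 1) (b := ((n:Nat):Int))
          (by exact_mod_cast h1)
        push_cast at h ⊢
        exact h
      have hn' : n < lst.length := by omega
      have hn1 : n - 1 < lst.length := by omega
      rw [hrange, List.foldl_append, ih (by omega)]
      have hzl : n - 1 < (lst.zip lst.tail).length := by
        rw [List.length_zip, List.length_tail]; omega
      have htake : (lst.zip lst.tail).take (n + 1 - 1)
          = (lst.zip lst.tail).take (n - 1) ++ [(lst[n-1]'hn1, lst[n]'hn')] := by
        have h2 : (lst.zip lst.tail).take ((n-1)+1)
            = (lst.zip lst.tail).take (n-1) ++ ((lst.zip lst.tail)[n-1]'hzl :: []) := by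
          rw [List.take_add_one, List.getElem?_eq_getElem hzl]; rfl
        rw [show n + 1 - 1 = (n-1)+1 by omega, h2]
        congr 2
        rw [List.getElem_zip, List.getElem_tail]
        congr 2
        omega
      rw [htake, List.foldl_append]
      simp only [List.foldl_cons, List.foldl_nil]
      have hg1 : PySem.List.pyGetD lst ((n:Nat):Int) "" = lst[n]'hn' := by
        rw [PySem.List.pyGetD_eq_getElem lst "" (by positivity) (by exact_mod_cast hn')]
        simp
      have hg0 : PySem.List.pyGetD lst (((n:Nat):Int) - 1) "" = lst[n-1]'hn1 := by
        rw [PySem.List.pyGetD_eq_getElem lst "" (by omega)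
          (by omega : ((n:Nat):Int) - 1 < (lst.length : Int))]
        congr 1
        omega
      rw [hg1, hg0]

-- invariant of the pair fold
theorem pvPairFold (ps : List (String × String)) (ks : List String) (f : String → Int)
    (hmem : ∀ p ∈ ps, p.2 = p.1 → p.1 ∈ ks) :
    (ps.foldl (fun d p => if p.2 = p.1 then d.insert p.2 (d.getD p.2 0 + 1) else d)
        (⟨ks.map (fun k => (k, f k))⟩ : PySem.Dict String Int))
      = ⟨ks.map (fun k => (k, f k + pvCnt ps k))⟩ := by
  induction ps generalizing f with
  | nil =>
    simp only [List.foldl_nil, pvCnt]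
    congr 1
    exact List.map_congr_left (fun k _ => by simp)
  | cons p ps ih =>
    simp only [List.foldl_cons]
    by_cases hp : p.2 = p.1
    · have hmem1 : p.2 ∈ ks := hp ▸ hmem p (List.mem_cons_self ..) hp
      rw [if_pos hp, pvGetD_mapshape ks f p.2, if_pos hmem1,
        pvInsert_mem ks f p.2 (f p.2 + 1) hmem1,
        ih _ (fun q hq hq2 => hmem q (List.mem_cons_of_mem _ hq) hq2)]
      congr 1
      refine List.map_congr_left (fun k _ => ?_)
      by_cases hk : k = p.2
      · subst hk
        have hcond : p.2 = p.1 ∧ p.1 = p.2 := ⟨hp, hp.symm⟩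
        simp only [pvCnt, if_pos hcond]
        simp [Prod.ext_iff]; ring
      · have : ¬(p.2 = p.1 ∧ p.1 = k) := fun ⟨_, h2⟩ => hk ((hp.trans h2).symm)
        simp only [if_neg hk, pvCnt, if_neg this]
        simp
    · rw [if_neg hp, ih f (fun q hq hq2 => hmem q (List.mem_cons_of_mem _ hq) hq2)]
      congr 1
      refine List.map_congr_left (fun k _ => ?_)
      have : ¬(p.2 = p.1 ∧ p.1 = k) := fun ⟨h1, _⟩ => hp h1
      simp [pvCnt, this]

-- invariant of B's run loop (auxiliary, fuel = bound on the list length)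
theorem pvRunLoopInvAux (n : Nat) : ∀ (lst ks : List String) (f : String → Int),
    lst.length ≤ n → ks.Nodup →
    (pvRunLoop ⟨ks.map (fun k => (k, f k))⟩ lst).items
      = ((ks ++ pvFo lst ks).map
          (fun k => (k, (if k ∈ ks then f k else 0) + pvCnt (lst.zip lst.tail) k))) := by
  induction n with
  | zero =>
    intro lst ks f hlen _
    rw [List.length_eq_zero_iff.mp (Nat.le_zero.mp hlen)]
    simp only [pvRunLoop, pvFo, List.append_nil]
    exact List.map_congr_left (fun k hk => by simp [hk, pvCnt])
  | succ n ih =>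
    intro lst ks f hlen hnd
    match lst with
    | [] =>
      simp only [pvRunLoop, pvFo, List.append_nil]
      exact List.map_congr_left (fun k hk => by simp [hk, pvCnt])
    | g :: rest =>
      rw [pvRunLoop, pvGetD_mapshape ks f g]
      have hrunmem : ∀ x ∈ rest.takeWhile (fun x => x == g), x = g :=
        fun x hx => beq_iff_eq.mp (List.mem_takeWhile_imp (p := fun y => y == g) hx)
      have hsplit : rest.takeWhile (fun x => x == g) ++ rest.dropWhile (fun x => x == g) = rest :=
        List.takeWhile_append_dropWhile
      have hlen' : (rest.dropWhile (fun x => x == g)).length ≤ n :=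
        le_trans (List.length_dropWhile_le _ _) (by simpa using Nat.le_of_succ_le_succ hlen)
      have hcnt := pvCnt_run g rest
      by_cases hg : g ∈ ks
      · rw [if_pos hg, pvInsert_mem ks f g _ hg, ih _ ks _ hlen' hnd]
        have hfo : pvFo (g :: rest) ks = pvFo (rest.dropWhile (fun x => x == g)) ks := by
          simp only [pvFo, if_pos hg]
          conv_lhs => rw [← hsplit]
          exact pvFo_append_of_mem _ _ _ (fun x hx => (hrunmem x hx) ▸ hg)
        rw [hfo]
        refine List.map_congr_left (fun k hk => ?_)
        rw [show ((g :: rest).zip (g :: rest).tail) = ((g :: rest).zip rest) from rfl, hcnt k]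
        by_cases hkg : k = g
        · subst hkg
          simp only [if_pos hg]
          exact Prod.ext rfl (by simp only [if_true]; ring)
        · simp only [if_neg hkg]
          exact Prod.ext rfl (by ring)
      · rw [if_neg hg, pvInsert_not_mem ks f g _ hg, ih _ (ks ++ [g]) _ hlen'
          (by simp [List.nodup_append, hnd]; exact fun a ha h => hg (h ▸ ha))]
        have hfo : pvFo (g :: rest) ks = g :: pvFo (rest.dropWhile (fun x => x == g)) (ks ++ [g]) := by
          simp only [pvFo, if_neg hg]
          congr 1
          conv_lhs => rw [← hsplit]
          rw [pvFo_append_of_mem _ _ _ (fun x hx => (hrunmem x hx) ▸ List.mem_cons_self ..)]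
          exact pvFo_congr _ _ _ (fun x => by simp [or_comm])
        rw [hfo, show ks ++ g :: pvFo (rest.dropWhile (fun x => x == g)) (ks ++ [g])
              = (ks ++ [g]) ++ pvFo (rest.dropWhile (fun x => x == g)) (ks ++ [g]) by
            rw [List.append_assoc]; rfl]
        refine List.map_congr_left (fun k hk => ?_)
        rw [show ((g :: rest).zip (g :: rest).tail) = ((g :: rest).zip rest) from rfl, hcnt k]
        by_cases hkg : k = g
        · subst hkg
          simp only [if_neg hg, if_pos (List.mem_append_right ks (List.mem_cons_self ..))]
          exact Prod.ext rfl (by simp only [if_true]; ring)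
        · have hmem2 : (k ∈ ks ++ [g]) = (k ∈ ks) := by simp [List.mem_append, hkg]
          simp only [if_neg hkg, hmem2]
          exact Prod.ext rfl (by ring)

-- invariant of B's run loop
theorem pvRunLoopInv (lst : List String) (ks : List String) (f : String → Int)
    (hnd : ks.Nodup) :
    (pvRunLoop ⟨ks.map (fun k => (k, f k))⟩ lst).items
      = ((ks ++ pvFo lst ks).map
          (fun k => (k, (if k ∈ ks then f k else 0) + pvCnt (lst.zip lst.tail) k))) :=
  pvRunLoopInvAux lst.length lst ks f le_rfl hnd

-- ===== VERDICT (by name: the statement is the Claim_ definition above) =====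
-- the two final dictionaries have the same items list
theorem pvItemsEq (lst : List String) :
    ((PySem.List.pyRange 1 (lst.length : Int) 1).foldl
      (fun d i =>
        if PySem.List.pyGetD lst i "" = PySem.List.pyGetD lst (i - 1) "" then
          let value := d.getD (PySem.List.pyGetD lst i "") 0
          d.insert (PySem.List.pyGetD lst i "") (value + 1)
        else d)
      (lst.foldl (fun d g => d.insert g 0) (⟨[]⟩ : PySem.Dict String Int))).items
    = (pvRunLoop ⟨[]⟩ lst).items := by
  have hA0 : lst.foldl (fun d g => d.insert g 0) (⟨[]⟩ : PySem.Dict String Int)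
      = ⟨(pvFo lst []).map (fun k => (k, (0:Int)))⟩ := by
    simpa using pvPhase1 lst []
  have htake : (lst.zip lst.tail).take (lst.length - 1) = lst.zip lst.tail :=
    List.take_of_length_le (by rw [List.length_zip, List.length_tail]; omega)
  have hmem : ∀ p ∈ lst.zip lst.tail, p.2 = p.1 → p.1 ∈ pvFo lst [] := by
    intro p hp _
    exact pvMem_fo_of lst [] p.1 (List.of_mem_zip hp).1 (by simp)
  have hB := pvRunLoopInv lst [] (fun _ => 0) (by simp)
  simp only [List.map_nil, List.nil_append, List.not_mem_nil, if_false, zero_add] at hB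
  rw [hA0, pvBridge lst lst.length le_rfl _, htake,
    pvPairFold (lst.zip lst.tail) (pvFo lst []) (fun _ => 0) hmem, hB]
  simp

-- ===== VERDICT (by name: the statement is the Claim_ definition above) =====
theorem most_consecutive_frequent_spec : Claim_equal_most_consecutive_frequent := by
  unfold Claim_equal_most_consecutive_frequent
  intro lst _ _
  unfold Spec_most_consecutive_frequent most_consecutive_frequent most_consecutive_frequent_alt
  exact congrArg
    (fun its : List (String × Int) => ((PySem.List.max? its (fun p => p.2)).map Prod.fst).getD "")
    (pvItemsEq lst)
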